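-- pv_equiv track=rewrite | github.com/jackmoody11/project-euler-solutions | python/p075.py | _get_coprime_combos
-- ===== SOURCE A (Python) =====
-- from math import gcd, sqrt
--
-- def _get_coprime_combos(s, limit):
--     """ Returns all combos of s and another number up to limit
--         such that s and t can help make primitive Pythagorean
--         triangle. """
--     combos = []
--     if s < 1:
--         raise ValueError("s should be greater than 1")
--     if s % 2 == 0:
--         start = 1
--     else:
--         start = 2
--     for t in range(start, s, 2):  # s and t must be opposite parity, so step by 2
--         if gcd(s, t) == 1 and (s + t) % 2 == 1:
--             combos += [(s, t)]
--     return combos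
-- ===== SOURCE B (Python) =====
-- def _get_coprime_combos(s, limit):
--     """Divisor-sieve re-implementation: mark multiples of every divisor
--     of s >= 2 in a boolean array, then collect opposite-parity survivors."""
--     if s < 1:
--         raise ValueError("s should be greater than 1")
--     coprime = [True] * s
--     for d in range(2, s + 1):
--         if s % d == 0:
--             for m in range(0, s, d):
--                 coprime[m] = False
--     start = 1 if s % 2 == 0 else 2
--     return [(s, t) for t in range(start, s, 2) if coprime[t]]
-- ===== Notes on version B (the rewrite author's own statement) =====
-- stated objective: alternative
-- what changed: Replaces the per-t gcd test inside the collection loop with a separate sieve pass that marks multiples of every divisor d>=2 of s in a boolean array, then a second pass collects the surviving opposite-parity t values.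
import Mathlib
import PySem

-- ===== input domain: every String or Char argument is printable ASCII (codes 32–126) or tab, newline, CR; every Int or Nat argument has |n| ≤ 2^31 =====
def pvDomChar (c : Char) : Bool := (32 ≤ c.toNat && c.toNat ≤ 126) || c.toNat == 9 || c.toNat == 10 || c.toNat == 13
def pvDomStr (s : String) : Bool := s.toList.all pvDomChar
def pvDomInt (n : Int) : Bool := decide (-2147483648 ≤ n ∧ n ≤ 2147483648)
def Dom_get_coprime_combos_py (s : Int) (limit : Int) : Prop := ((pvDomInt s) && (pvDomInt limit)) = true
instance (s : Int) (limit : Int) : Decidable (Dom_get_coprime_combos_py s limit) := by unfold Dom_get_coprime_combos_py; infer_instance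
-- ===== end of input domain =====

-- B replaces A's per-t gcd test with a divisor sieve over a boolean array followed by a
-- separate collection pass (objective: alternative; same result, similar cost).

-- ===== PORT A =====
def get_coprime_combos_py (s : Int) (limit : Int) : List (Int × Int) :=
  if s < 1 then []   -- Python raises ValueError here; excluded by Pre_
  else
    let start : Int := if PySem.Int.mod s 2 = 0 then 1 else 2
    (PySem.List.pyRange start s 2).foldl
      (fun acc t => if Int.gcd s t = 1 ∧ PySem.Int.mod (s + t) 2 = 1 then acc ++ [(s, t)] else acc) []

-- ===== PORT B =====
def get_coprime_combos_py_alt (s : Int) (limit : Int) : List (Int × Int) :=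
  if s < 1 then []   -- Python raises ValueError here; excluded by Pre_
  else
    let coprime0 : List Bool := List.replicate s.toNat true
    let coprime : List Bool :=
      (PySem.List.pyRange 2 (s + 1) 1).foldl
        (fun arr d =>
          if PySem.Int.mod s d = 0 then
            (PySem.List.pyRange 0 s d).foldl (fun a x => PySem.List.pySetD a x false) arr
          else arr) coprime0
    let start : Int := if PySem.Int.mod s 2 = 0 then 1 else 2
    (PySem.List.pyRange start s 2).foldl
      (fun acc t => if PySem.List.pyGetD coprime t false = true then acc ++ [(s, t)] else acc) []

-- ===== PRECONDITION & SPEC =====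
-- Pre_ excludes exactly s < 1, where the Python A raises ValueError.
def Pre_get_coprime_combos_py (s : Int) (limit : Int) : Prop := 1 ≤ s
instance (s : Int) (limit : Int) : Decidable (Pre_get_coprime_combos_py s limit) := by unfold Pre_get_coprime_combos_py; infer_instance
def pvWitness_get_coprime_combos_py : Int × Int := (12, 0)

def Spec_get_coprime_combos_py (s : Int) (limit : Int) (out : List (Int × Int)) : Prop := out = get_coprime_combos_py_alt s limit
instance (s : Int) (limit : Int) (out : List (Int × Int)) : Decidable (Spec_get_coprime_combos_py s limit out) := by unfold Spec_get_coprime_combos_py; infer_instance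

-- ===== CLAIM (what is proved, stated in full; the proofs are below) =====
def Claim_equal_get_coprime_combos_py : Prop := ∀ (s : Int) (limit : Int), Dom_get_coprime_combos_py s limit → Pre_get_coprime_combos_py s limit → Spec_get_coprime_combos_py s limit (get_coprime_combos_py s limit)

-- ===== LEMMAS AND PROOFS =====

-- reading an index after one Python assignment arr[x] = False (both indices nonnegative)
lemma getD_setD_false (a : List Bool) (x m : Int) (hx : 0 ≤ x) (hm : 0 ≤ m) :
    PySem.List.pyGetD (PySem.List.pySetD a x false) m false
      = if m = x then false else PySem.List.pyGetD a m false := by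
  rw [PySem.List.pySetD_of_nonneg a false hx, PySem.List.pyGetD_of_nonneg _ _ hm,
      PySem.List.pyGetD_of_nonneg _ _ hm]
  simp only [List.getD, List.getElem?_set]
  by_cases hxm : m = x
  · subst hxm
    by_cases hlen : m.toNat < a.length <;> simp [hlen]
  · have : x.toNat ≠ m.toNat := by omega
    simp [this, hxm]

-- the inner marking loop 'for m in L: coprime[m] = False'
lemma sieve_mark (L : List Int) (arr : List Bool) (m : Int)
    (hL : ∀ x ∈ L, 0 ≤ x) (hm : 0 ≤ m) :
    PySem.List.pyGetD (L.foldl (fun a x => PySem.List.pySetD a x false) arr) m false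
      = if m ∈ L then false else PySem.List.pyGetD arr m false := by
  induction L generalizing arr with
  | nil => simp
  | cons x t ih =>
    have hx : 0 ≤ x := hL x (by simp)
    rw [List.foldl_cons, ih _ (fun y hy => hL y (by simp [hy])),
        getD_setD_false arr x m hx hm]
    by_cases h1 : m ∈ t <;> by_cases h2 : m = x <;> simp [h1, h2]

-- the outer sieve loop over candidate divisors D
lemma sieve_outer (s : Int) (D : List Int) (arr : List Bool) (m : Int)
    (hD : ∀ d ∈ D, 0 < d) (hm0 : 0 ≤ m) (hms : m < s) :
    PySem.List.pyGetD
      (D.foldl (fun a d =>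
        if PySem.Int.mod s d = 0 then
          (PySem.List.pyRange 0 s d).foldl (fun a x => PySem.List.pySetD a x false) a
        else a) arr) m false
      = if ∃ d ∈ D, d ∣ s ∧ d ∣ m then false else PySem.List.pyGetD arr m false := by
  induction D generalizing arr with
  | nil => simp
  | cons d t ih =>
    have hd : 0 < d := hD d (by simp)
    rw [List.foldl_cons, ih _ (fun y hy => hD y (by simp [hy]))]
    have hsplit : (∃ x ∈ d :: t, x ∣ s ∧ x ∣ m) ↔ (d ∣ s ∧ d ∣ m) ∨ (∃ x ∈ t, x ∣ s ∧ x ∣ m) := by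
      constructor
      · rintro ⟨x, hx, hxs, hxm⟩
        rcases List.mem_cons.mp hx with rfl | hx
        · exact Or.inl ⟨hxs, hxm⟩
        · exact Or.inr ⟨x, hx, hxs, hxm⟩
      · rintro (⟨h1, h2⟩ | ⟨x, hx, hxs, hxm⟩)
        · exact ⟨d, by simp, h1, h2⟩
        · exact ⟨x, by simp [hx], hxs, hxm⟩
    by_cases hdvd : PySem.Int.mod s d = 0
    · have hds : d ∣ s := (PySem.Int.mod_eq_zero_iff_dvd s d).mp hdvd
      rw [if_pos hdvd,
          sieve_mark _ arr m
            (fun x hx => ((PySem.List.mem_pyRange_iff_of_pos hd x).mp hx).1) hm0]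
      have hmem : m ∈ PySem.List.pyRange 0 s d ↔ d ∣ m := by
        rw [PySem.List.mem_pyRange_iff_of_pos hd]
        constructor
        · rintro ⟨_, _, h⟩; simpa using h
        · intro h; exact ⟨hm0, hms, by simpa using h⟩
      by_cases h1 : ∃ x ∈ t, x ∣ s ∧ x ∣ m
      · rw [if_pos h1, if_pos (hsplit.mpr (Or.inr h1))]
      · rw [if_neg h1]
        by_cases h2 : d ∣ m
        · rw [if_pos (hmem.mpr h2), if_pos (hsplit.mpr (Or.inl ⟨hds, h2⟩))]
        · rw [if_neg (fun h => h2 (hmem.mp h)),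
              if_neg (fun h => (hsplit.mp h).elim (fun h' => h2 h'.2) h1)]
    · have hds : ¬ d ∣ s := fun h => hdvd ((PySem.Int.mod_eq_zero_iff_dvd s d).mpr h)
      rw [if_neg hdvd]
      by_cases h1 : ∃ x ∈ t, x ∣ s ∧ x ∣ m
      · rw [if_pos h1, if_pos (hsplit.mpr (Or.inr h1))]
      · rw [if_neg h1,
            if_neg (fun h => (hsplit.mp h).elim (fun h' => hds h'.1) h1)]

-- a divisor d with 2 ≤ d ≤ s dividing both s and t exists iff gcd(s,t) ≠ 1
lemma exists_divisor_iff_gcd_ne_one (s t : Int) (ht1 : 1 ≤ t) (hts : t < s) :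
    (∃ d ∈ PySem.List.pyRange 2 (s + 1) 1, d ∣ s ∧ d ∣ t) ↔ ¬ Int.gcd s t = 1 := by
  constructor
  · rintro ⟨d, hd, hds, hdt⟩ hg
    rw [PySem.List.mem_pyRange_one] at hd
    have hcast : ((d.toNat : Int)) = d := by omega
    have hdg : d.toNat ∣ Int.gcd s t :=
      Int.dvd_gcd (by rw [hcast]; exact hds) (by rw [hcast]; exact hdt)
    rw [hg] at hdg
    have := Nat.le_of_dvd (by norm_num) hdg
    omega
  · intro hg
    have hs : 0 < s := by omega
    have hg0 : Int.gcd s t ≠ 0 := by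
      intro h; rw [Int.gcd_eq_zero_iff] at h; omega
    refine ⟨(Int.gcd s t : Int), ?_, Int.gcd_dvd_left s t, Int.gcd_dvd_right s t⟩
    rw [PySem.List.mem_pyRange_one]
    have hle : (Int.gcd s t : Int) ≤ s := Int.le_of_dvd hs (Int.gcd_dvd_left s t)
    have : 2 ≤ Int.gcd s t := by omega
    omega

-- every t the loop visits has 1 ≤ t < s and makes s + t odd
lemma range_facts (s t : Int) (_hs : 1 ≤ s)
    (ht : t ∈ PySem.List.pyRange (if PySem.Int.mod s 2 = 0 then 1 else 2) s 2) :
    1 ≤ t ∧ t < s ∧ PySem.Int.mod (s + t) 2 = 1 := by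
  have hm1 : PySem.Int.mod s 2 = s % 2 := PySem.Int.mod_eq_emod_of_pos (by norm_num)
  have hm2 : PySem.Int.mod (s + t) 2 = (s + t) % 2 := PySem.Int.mod_eq_emod_of_pos (by norm_num)
  rw [PySem.List.mem_pyRange_iff_of_pos (by norm_num)] at ht
  rw [hm1] at ht
  rw [hm2]
  split_ifs at ht ⊢ with hpar
  · obtain ⟨h1, h2, h3⟩ := ht; refine ⟨by omega, h2, by omega⟩
  · obtain ⟨h1, h2, h3⟩ := ht
    have : s % 2 = 1 := by omega
    refine ⟨by omega, h2, by omega⟩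

-- reading the finished sieve at 1 ≤ t < s gives exactly the gcd test
lemma sieve_value (s t : Int) (ht1 : 1 ≤ t) (hts : t < s) :
    PySem.List.pyGetD
      ((PySem.List.pyRange 2 (s + 1) 1).foldl
        (fun arr d =>
          if PySem.Int.mod s d = 0 then
            (PySem.List.pyRange 0 s d).foldl (fun a x => PySem.List.pySetD a x false) arr
          else arr) (List.replicate s.toNat true)) t false
      = decide (Int.gcd s t = 1) := by
  rw [sieve_outer s _ _ t
      (fun d hd => by rw [PySem.List.mem_pyRange_one] at hd; omega) (by omega) hts]
  have hbase : PySem.List.pyGetD (List.replicate s.toNat true) t false = true := by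
    rw [PySem.List.pyGetD_of_nonneg _ _ (by omega : (0:Int) ≤ t)]
    have : t.toNat < s.toNat := by omega
    simp [List.getD, this]
  by_cases hg : Int.gcd s t = 1
  · have hne : ¬ ∃ d ∈ PySem.List.pyRange 2 (s + 1) 1, d ∣ s ∧ d ∣ t := by
      rw [exists_divisor_iff_gcd_ne_one s t ht1 hts]; simp [hg]
    rw [if_neg hne, hbase]
    simp [hg]
  · have hex : ∃ d ∈ PySem.List.pyRange 2 (s + 1) 1, d ∣ s ∧ d ∣ t :=
      (exists_divisor_iff_gcd_ne_one s t ht1 hts).mpr hg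
    rw [if_pos hex]
    simp [hg]

-- ===== VERDICT (by name: the statement is the Claim_ definition above) =====
theorem get_coprime_combos_py_spec : Claim_equal_get_coprime_combos_py := by
  intro s limit _ hpre
  unfold Spec_get_coprime_combos_py get_coprime_combos_py get_coprime_combos_py_alt
  have hs : ¬ s < 1 := by exact not_lt.mpr hpre
  rw [if_neg hs, if_neg hs]
  simp only []
  rw [PySem.List.foldl_append_ite
        (p := fun t => Int.gcd s t = 1 ∧ PySem.Int.mod (s + t) 2 = 1) (f := fun t => (s, t)),
      PySem.List.foldl_append_ite
        (p := fun t => PySem.List.pyGetD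
          ((PySem.List.pyRange 2 (s + 1) 1).foldl
            (fun arr d =>
              if PySem.Int.mod s d = 0 then
                (PySem.List.pyRange 0 s d).foldl (fun a x => PySem.List.pySetD a x false) arr
              else arr) (List.replicate s.toNat true)) t false = true) (f := fun t => (s, t))]
  simp only [List.nil_append]
  congr 1
  apply List.filter_congr
  intro t ht
  obtain ⟨ht1, hts, hodd⟩ := range_facts s t hpre ht
  have hodd' : (s + t) % 2 = 1 := by
    rw [← PySem.Int.mod_eq_emod_of_pos (by norm_num : (0:Int) < 2)]; exact hodd
  rw [sieve_value s t ht1 hts]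
  by_cases hg : Int.gcd s t = 1 <;> simp [hg, hodd']
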